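-- pv_equiv track=rewrite | github.com/SyncHot/ethos-os-ethos-apps | apps/wireguard/backend.py | _get_next_ip
-- ===== SOURCE A (Python) =====
-- WG_NET_PREFIX = "10.100.0"
--
-- def _get_next_ip(peers):
--     used_ips = set()
--     for p in peers:
--         ips = p.get('AllowedIPs', '').split(',')
--         for ip in ips:
--             ip = ip.strip()
--             if ip.startswith(WG_NET_PREFIX):
--                 # Extract last octet
--                 try:
--                     parts = ip.split('/')
--                     addr = parts[0]
--                     octet = int(addr.split('.')[-1])
--                     used_ips.add(octet)
--                 except (ValueError, IndexError):
--                     pass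
--
--     # Server is usually .1
--     used_ips.add(1)
--
--     for i in range(2, 255):
--         if i not in used_ips:
--             return f"{WG_NET_PREFIX}.{i}/32"
--     return None
-- ===== SOURCE B (Python) =====
-- WG_NET_PREFIX = "10.100.0"
--
-- def _octets(peers):
--     for p in peers:
--         for ip in p.get('AllowedIPs', '').split(','):
--             ip = ip.strip()
--             if ip.startswith(WG_NET_PREFIX):
--                 try:
--                     yield int(ip.split('/')[0].split('.')[-1])
--                 except ValueError:
--                     pass
--
-- def _get_next_ip(peers):
--     candidate = 2
--     for o in sorted(_octets(peers)):
--         if o > candidate: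
--             break
--         if o == candidate:
--             candidate += 1
--     return f"{WG_NET_PREFIX}.{candidate}/32" if candidate < 255 else None
-- ===== Notes on version B (the rewrite author's own statement) =====
-- stated objective: alternative
-- what changed: B never builds a membership set or scans range(2,255): it sorts the parsed octets and walks the sorted list with a rising candidate counter (break at the first gap), a sort-then-gap-scan instead of A's set-membership first-miss scan.
import Mathlib
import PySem

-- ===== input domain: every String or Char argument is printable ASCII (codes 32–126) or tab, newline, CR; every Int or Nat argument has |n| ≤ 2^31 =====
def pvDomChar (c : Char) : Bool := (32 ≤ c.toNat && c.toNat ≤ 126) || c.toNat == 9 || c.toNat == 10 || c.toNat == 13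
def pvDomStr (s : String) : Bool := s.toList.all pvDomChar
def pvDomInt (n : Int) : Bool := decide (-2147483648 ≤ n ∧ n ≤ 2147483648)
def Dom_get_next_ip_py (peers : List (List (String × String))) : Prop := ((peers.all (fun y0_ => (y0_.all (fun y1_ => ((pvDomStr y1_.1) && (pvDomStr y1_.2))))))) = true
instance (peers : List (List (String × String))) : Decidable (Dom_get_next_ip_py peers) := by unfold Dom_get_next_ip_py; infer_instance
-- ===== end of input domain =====

set_option maxHeartbeats 800000


-- B drops A's membership set and range(2,255) first-miss scan entirely: it sorts the
-- parsed octets and walks the sorted list with a rising candidate counter (break at the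
-- first gap); objective: alternative algorithm (sort-then-gap-scan), similar cost.

def pvWG : String := "10.100.0"

-- s.split(sep) for the literal non-empty separators used here (split? is some for sep ≠ "")
def pvSplit (s sep : String) : List String :=
  (PySem.Str.split? s sep).getD []

-- ===== PORT A =====
-- body of A's inner 'for ip in ips' loop (try/except (ValueError, IndexError): pass)
def pvStepA (used : PySem.Set Int) (ip0 : String) : PySem.Set Int :=
  let ip := PySem.Str.strip ip0
  if PySem.Str.startswith ip pvWG then
    match PySem.List.pyGet? (pvSplit ip "/") 0 with          -- parts[0]; none = IndexError, caught
    | none => used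
    | some addr =>
      match PySem.List.pyGet? (pvSplit addr ".") (-1) with   -- [-1]; none = IndexError, caught
      | none => used
      | some last =>
        match PySem.Int.ofStr? last with                     -- int(...); none = ValueError, caught
        | none => used
        | some octet => PySem.Set.add used octet
  else used

def get_next_ip_py (peers : List (List (String × String))) : Option String :=
  let used : PySem.Set Int :=
    peers.foldl (fun used p =>
      (pvSplit (PySem.Dict.getD (PySem.Dict.mk p) "AllowedIPs" "") ",").foldl pvStepA used)
      PySem.Set.empty
  let used := PySem.Set.add used 1
  (PySem.List.pyRange 2 255 1).findSome? (fun i =>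
    if PySem.Set.contains used i then none
    else some (pvWG ++ "." ++ PySem.Int.toStr i ++ "/32"))

-- ===== PORT B =====
-- Source B's _octets generator, one entry: the parsed octet, or none when the body yields nothing
def pvOctet (ip0 : String) : Option Int :=
  let ip := PySem.Str.strip ip0
  if PySem.Str.startswith ip pvWG then
    match PySem.List.pyGet? (pvSplit ip "/") 0 with
    | none => none
    | some addr =>
      match PySem.List.pyGet? (pvSplit addr ".") (-1) with
      | none => none
      | some last => PySem.Int.ofStr? last
  else none

-- Source B's _octets: the yielded octets, in generator order
def pvOctets (peers : List (List (String × String))) : List Int :=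
  peers.flatMap (fun p =>
    (pvSplit (PySem.Dict.getD (PySem.Dict.mk p) "AllowedIPs" "") ",").filterMap pvOctet)

-- Source B's 'for o in sorted(...)' loop with break, carrying candidate
def pvWalk (cand : Int) : List Int → Int
  | [] => cand
  | o :: t =>
    if cand < o then cand                  -- break
    else if o = cand then pvWalk (cand + 1) t
    else pvWalk cand t

def get_next_ip_py_alt (peers : List (List (String × String))) : Option String :=
  let cand := pvWalk 2 (PySem.List.sorted (pvOctets peers) (fun x => x) false)
  if cand < 255 then some (pvWG ++ "." ++ PySem.Int.toStr cand ++ "/32") else none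

-- ===== PRECONDITION & SPEC =====
def Spec_get_next_ip_py (peers : List (List (String × String))) (out : Option String) : Prop := out = get_next_ip_py_alt peers
instance (peers : List (List (String × String))) (out : Option String) : Decidable (Spec_get_next_ip_py peers out) := by unfold Spec_get_next_ip_py; infer_instance

-- ===== CLAIM (what is proved, stated in full; the proofs are below) =====
def Claim_equal_get_next_ip_py : Prop := ∀ (peers : List (List (String × String))), Dom_get_next_ip_py peers → Spec_get_next_ip_py peers (get_next_ip_py peers)

-- ===== LEMMAS AND PROOFS =====

-- A's loop body is B's pvOctet, folded into the accumulating set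
theorem pvStepA_eq (used : PySem.Set Int) (ip : String) :
    pvStepA used ip = match pvOctet ip with
      | none => used
      | some o => PySem.Set.add used o := by
  simp only [pvStepA, pvOctet]
  by_cases h : PySem.Str.startswith (PySem.Str.strip ip) pvWG = true
  · simp only [h, if_true]
    cases PySem.List.pyGet? (pvSplit (PySem.Str.strip ip) "/") 0 with
    | none => rfl
    | some addr =>
      dsimp only
      cases PySem.List.pyGet? (pvSplit addr ".") (-1) with
      | none => rfl
      | some last => dsimp only
  · simp only [h, Bool.false_eq_true, if_false]

theorem mem_foldl_stepA (l : List String) (s : PySem.Set Int) (x : Int) :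
    x ∈ l.foldl pvStepA s ↔ x ∈ s ∨ x ∈ l.filterMap pvOctet := by
  induction l generalizing s with
  | nil => simp
  | cons ip t ih =>
    simp only [List.foldl_cons, pvStepA_eq]
    rcases h : pvOctet ip with _ | o <;> dsimp only
    · simp [ih, h]
    · simp only [ih, PySem.Set.mem_add, List.filterMap_cons, h, List.mem_cons]
      tauto

-- membership in A's accumulated set = membership in B's octet list
theorem mem_usedA (peers : List (List (String × String))) (x : Int) :
    x ∈ peers.foldl (fun used p =>
        (pvSplit (PySem.Dict.getD (PySem.Dict.mk p) "AllowedIPs" "") ",").foldl pvStepA used)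
        PySem.Set.empty
    ↔ x ∈ pvOctets peers := by
  suffices h : ∀ (ps : List (List (String × String))) (s : PySem.Set Int),
      x ∈ ps.foldl (fun used p =>
        (pvSplit (PySem.Dict.getD (PySem.Dict.mk p) "AllowedIPs" "") ",").foldl pvStepA used) s
      ↔ x ∈ s ∨ x ∈ pvOctets ps by
    rw [h]
    simp [PySem.Set.empty]
  intro ps
  induction ps with
  | nil => simp [pvOctets]
  | cons p t ih =>
    intro s
    simp only [List.foldl_cons, pvOctets, List.flatMap_cons, List.mem_append, ih,
      mem_foldl_stepA]
    tauto

-- B's walk over a ≤-sorted list computes the least m ≥ cand absent from the list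
theorem pvWalk_spec (l : List Int) (hs : l.Pairwise (· ≤ ·)) : ∀ (cand : Int),
    cand ≤ pvWalk cand l ∧ pvWalk cand l ∉ l ∧
      ∀ m, cand ≤ m → m < pvWalk cand l → m ∈ l := by
  induction l with
  | nil => intro cand; simp [pvWalk]
  | cons o t ih =>
    intro cand
    have hst := List.pairwise_cons.mp hs
    by_cases h1 : cand < o
    · refine ⟨by simp [pvWalk, h1], ?_, fun m hm1 hm2 => by simp only [pvWalk, h1, if_true] at hm2; omega⟩
      simp only [pvWalk, h1, if_true, List.mem_cons]
      push Not
      refine ⟨by omega, fun hc => ?_⟩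
      have := hst.1 cand hc
      omega
    · by_cases h2 : o = cand
      · obtain ⟨hle, hnm, hall⟩ := ih hst.2 (cand + 1)
        have heq : pvWalk cand (o :: t) = pvWalk (cand + 1) t := by
          simp [pvWalk, h2]
        rw [heq]
        refine ⟨by omega, ?_, ?_⟩
        · simp only [List.mem_cons]
          push Not
          exact ⟨by omega, hnm⟩
        · intro m hm1 hm2
          rcases eq_or_lt_of_le hm1 with rfl | hlt
          · simp [h2]
          · exact List.mem_cons_of_mem _ (hall m (by omega) hm2)
      · obtain ⟨hle, hnm, hall⟩ := ih hst.2 cand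
        have heq : pvWalk cand (o :: t) = pvWalk cand t := by
          simp [pvWalk, h1, h2]
        rw [heq]
        refine ⟨hle, ?_, ?_⟩
        · simp only [List.mem_cons]
          push Not
          exact ⟨by omega, hnm⟩
        · intro m hm1 hm2
          exact List.mem_cons_of_mem _ (hall m hm1 hm2)

-- A's first-miss scan over range(a,b), characterised by the least free value r
theorem scan_range (c : Int → Bool) (fmt : Int → String) (r : Int) :
    ∀ (n : Nat) (a b : Int), (b - a).toNat = n →
    a ≤ r → (∀ m, a ≤ m → m < r → c m = true) → c r = false →
    (PySem.List.pyRange a b 1).findSome? (fun i => if c i then none else some (fmt i))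
      = if r < b then some (fmt r) else none := by
  intro n
  induction n with
  | zero =>
    intro a b hn har _ _
    rw [PySem.List.pyRange_one_eq_nil (by omega)]
    simp only [List.findSome?_nil]
    rw [if_neg (by omega)]
  | succ k ih =>
    intro a b hn har hall hr
    have hab : a < b := by omega
    rw [PySem.List.pyRange_one_cons hab]
    simp only [List.findSome?_cons]
    rcases eq_or_lt_of_le har with rfl | hlt
    · simp [hr, hab]
    · have hca : c a = true := hall a le_rfl hlt
      simp only [hca, if_true]
      exact ih (a + 1) b (by omega) (by omega) (fun m hm => hall m (by omega)) hr

-- ===== VERDICT (by name: the statement is the Claim_ definition above) =====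
theorem get_next_ip_py_spec : Claim_equal_get_next_ip_py := by
  intro peers _
  unfold Spec_get_next_ip_py get_next_ip_py get_next_ip_py_alt
  simp only []
  set usedA := PySem.Set.add (peers.foldl (fun used p =>
      (pvSplit (PySem.Dict.getD (PySem.Dict.mk p) "AllowedIPs" "") ",").foldl pvStepA used)
      PySem.Set.empty) 1 with husedA
  have hmemA : ∀ x : Int, x ∈ usedA ↔ (x ∈ pvOctets peers ∨ x = 1) := by
    intro x
    rw [husedA, PySem.Set.mem_add, mem_usedA]
  set srt := PySem.List.sorted (pvOctets peers) (fun x => x) false with hsrt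
  obtain ⟨h2r, hrnm, hall⟩ :=
    pvWalk_spec srt (PySem.List.sorted_pairwise (pvOctets peers) (fun x => x)) 2
  set r := pvWalk 2 srt with hr
  have hmem_srt : ∀ x : Int, x ∈ srt ↔ x ∈ pvOctets peers := fun x => by
    rw [hsrt]; exact PySem.List.mem_sorted (pvOctets peers) (fun y => y) false x
  have hscan := scan_range (fun i => PySem.Set.contains usedA i)
    (fun i => pvWG ++ "." ++ PySem.Int.toStr i ++ "/32") r
    ((255 - 2 : Int)).toNat 2 255 rfl h2r
    (fun m hm1 hm2 => by
      rw [PySem.Set.contains_iff, hmemA]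
      exact Or.inl ((hmem_srt m).mp (hall m hm1 hm2)))
    (by
      rw [Bool.eq_false_iff, Ne, PySem.Set.contains_iff, hmemA]
      push Not
      exact ⟨fun hc => hrnm ((hmem_srt r).mpr hc), by omega⟩)
  rw [hscan]
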